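-- pv_equiv track=rewrite | github.com/Abigye/LeetcodeQuestSolns | patterns/two_pointers/word_palindrome.py | words_palindrome_three
-- ===== SOURCE A (Python) =====
-- def words_palindrome_three(s, t):
--     if len(s) != len(t):
--         return False
--
--     left = 0
--     right = len(s)-1
--
--     while left < len(s) : #or left <= right
--         if  s[left].lower() != t[right].lower():
--             return False
--         else:
--             left+=1
--             right-=1
--     return True
-- ===== SOURCE B (Python) =====
-- def words_palindrome_three(s, t):
--     # s equals reversed t (case-insensitively) iff s+t is itself a palindrome
--     # (given equal lengths): different algorithm, no cross-indexing of s vs t.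
--     if len(s) != len(t):
--         return False
--     u = (s + t).lower()
--     return u == u[::-1]
-- ===== Notes on version B (the rewrite author's own statement) =====
-- stated objective: alternative
-- what changed: Replaces the two-pointer cross-comparison of s against t with a palindrome test on the single concatenated string: lower s+t once and check it equals its own reverse, using the fact that (for equal lengths) s == reversed(t) iff s+t is a palindrome.
import Mathlib
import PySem

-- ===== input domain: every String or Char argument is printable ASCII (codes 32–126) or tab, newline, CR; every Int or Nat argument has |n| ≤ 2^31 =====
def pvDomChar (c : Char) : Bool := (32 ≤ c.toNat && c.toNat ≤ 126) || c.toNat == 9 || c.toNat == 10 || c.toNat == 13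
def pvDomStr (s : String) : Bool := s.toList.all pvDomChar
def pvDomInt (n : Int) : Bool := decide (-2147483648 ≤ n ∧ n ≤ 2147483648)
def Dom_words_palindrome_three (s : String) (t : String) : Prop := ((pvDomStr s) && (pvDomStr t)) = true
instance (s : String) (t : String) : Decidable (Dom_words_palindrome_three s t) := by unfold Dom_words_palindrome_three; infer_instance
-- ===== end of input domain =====

-- B replaces A's two-pointer cross-comparison of s against t by a palindrome test on the
-- single lowered concatenation s+t (objective: alternative algorithm, same cost).

-- ===== PORT A =====
-- the while loop: left walks up, right walks down; the 'none' branches mirror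
-- IndexError, which is unreachable since len(s) = len(t) holds when the loop runs
def wpLoop (ls lt : List Char) (left right : Int) : Bool :=
  if _h : left < (ls.length : Int) then
    match PySem.List.pyGet? ls left, PySem.List.pyGet? lt right with
    | some a, some b =>
        if PySem.Chars.lowerChar a != PySem.Chars.lowerChar b then false
        else wpLoop ls lt (left + 1) (right - 1)
    | _, _ => false
  else true
termination_by ((ls.length : Int) - left).toNat
decreasing_by omega

def words_palindrome_three (s : String) (t : String) : Bool :=
  if s.toList.length ≠ t.toList.length then false
  else wpLoop s.toList t.toList 0 ((s.toList.length : Int) - 1)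

-- ===== PORT B =====
-- u = (s + t).lower(); return u == u[::-1]
def words_palindrome_three_alt (s : String) (t : String) : Bool :=
  if s.toList.length ≠ t.toList.length then false
  else
    let u := (s.toList ++ t.toList).map PySem.Chars.lowerChar
    decide (u = u.reverse)

-- ===== PRECONDITION & SPEC =====
def Spec_words_palindrome_three (s : String) (t : String) (out : Bool) : Prop := out = words_palindrome_three_alt s t
instance (s : String) (t : String) (out : Bool) : Decidable (Spec_words_palindrome_three s t out) := by unfold Spec_words_palindrome_three; infer_instance

-- ===== CLAIM (what is proved, stated in full; the proofs are below) =====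
def Claim_equal_words_palindrome_three : Prop := ∀ (s : String) (t : String), Dom_words_palindrome_three s t → Spec_words_palindrome_three s t (words_palindrome_three s t)

-- ===== LEMMAS AND PROOFS =====

-- loop invariant: from position `left` with right = n-1-left, the loop decides
-- equality of the lowered suffixes of ls and of lt.reverse
theorem wpLoop_eq (ls lt : List Char) (hlen : ls.length = lt.length) :
    ∀ (left : Int), 0 ≤ left →
      wpLoop ls lt left ((ls.length : Int) - 1 - left) =
        decide ((ls.drop left.toNat).map PySem.Chars.lowerChar
              = (lt.reverse.drop left.toNat).map PySem.Chars.lowerChar) := by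
  intro left hle
  induction h : ((ls.length : Int) - left).toNat using Nat.strong_induction_on
    generalizing left with
  | _ n ih =>
  rw [wpLoop]
  by_cases hlt : left < (ls.length : Int)
  · have hL : left.toNat < ls.length := by omega
    have hR0 : (0:Int) ≤ (ls.length : Int) - 1 - left := by omega
    have hRlt : (ls.length : Int) - 1 - left < (lt.length : Int) := by omega
    have hA := PySem.List.pyGet?_eq_some_getElem (xs := ls) (i := left) hle (by omega)
    have hB := PySem.List.pyGet?_eq_some_getElem (xs := lt)
      (i := (ls.length : Int) - 1 - left) hR0 (by omega)
    simp only [hlt, dif_pos, hA, hB]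
    have hidx : ((ls.length : Int) - 1 - left).toNat = lt.length - 1 - left.toNat := by omega
    have hRl : left.toNat < lt.reverse.length := by simp [List.length_reverse]; omega
    have hrev : lt.reverse[left.toNat] = lt[((ls.length : Int) - 1 - left).toNat]'(by omega) := by
      rw [List.getElem_reverse]
      simp only [hidx]
    have hdropL : ls.drop left.toNat = ls[left.toNat] :: ls.drop (left.toNat + 1) :=
      List.drop_eq_getElem_cons hL
    have hdropR : lt.reverse.drop left.toNat
        = lt.reverse[left.toNat] :: lt.reverse.drop (left.toNat + 1) :=
      List.drop_eq_getElem_cons hRl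
    by_cases heq : PySem.Chars.lowerChar ls[left.toNat]
        = PySem.Chars.lowerChar (lt[((ls.length : Int) - 1 - left).toNat]'(by omega))
    · simp only [heq, bne_self_eq_false, Bool.false_eq_true, if_false]
      have harg : (ls.length : Int) - 1 - left - 1 = (ls.length : Int) - 1 - (left + 1) := by ring
      rw [harg, ih (((ls.length : Int) - (left + 1)).toNat) (by omega) (left + 1) (by omega) rfl]
      have ht : (left + 1).toNat = left.toNat + 1 := by omega
      rw [ht, hdropL, hdropR, hrev]
      simp only [List.map_cons, List.cons.injEq, heq, true_and]
    · simp only [bne_iff_ne, ne_eq, heq, not_false_eq_true, if_true]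
      rw [hdropL, hdropR, hrev]
      simp only [List.map_cons]
      have hne : ¬ (PySem.Chars.lowerChar ls[left.toNat] ::
            List.map PySem.Chars.lowerChar (List.drop (left.toNat + 1) ls)
          = PySem.Chars.lowerChar (lt[((ls.length : Int) - 1 - left).toNat]'(by omega)) ::
            List.map PySem.Chars.lowerChar (List.drop (left.toNat + 1) lt.reverse)) := by
        intro hc
        exact heq (List.cons_eq_cons.mp hc).1
      exact (decide_eq_false hne).symm
  · simp only [hlt, dif_neg, not_false_eq_true]
    have h1 : ls.length ≤ left.toNat := by omega
    have h2 : lt.reverse.length ≤ left.toNat := by simp [List.length_reverse]; omega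
    rw [List.drop_eq_nil_of_le h1, List.drop_eq_nil_of_le h2]
    simp

-- for equal-length lists, a = b.reverse iff a ++ b is a palindrome
theorem mirror_iff_palindrome (a b : List Char) (hlen : a.length = b.length) :
    (a = b.reverse) ↔ (a ++ b = (a ++ b).reverse) := by
  rw [List.reverse_append]
  constructor
  · intro h
    have hb : a.reverse = b := by rw [h, List.reverse_reverse]
    rw [h]
    simp
  · intro h
    have := List.append_inj h (by simp [hlen])
    exact this.1

-- ===== VERDICT (by name: the statement is the Claim_ definition above) =====
theorem words_palindrome_three_spec : Claim_equal_words_palindrome_three := by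
  intro s t _
  unfold Spec_words_palindrome_three words_palindrome_three words_palindrome_three_alt
  by_cases hlen : s.toList.length = t.toList.length
  · rw [if_neg (by simpa using hlen), if_neg (by simpa using hlen)]
    have hloop := wpLoop_eq s.toList t.toList hlen 0 le_rfl
    simp only [sub_zero, Int.toNat_zero, List.drop_zero] at hloop
    rw [hloop]
    simp only [List.map_append, List.map_reverse]
    congr 1
    apply propext
    exact mirror_iff_palindrome _ _ (by simp [hlen])
  · rw [if_pos hlen, if_pos hlen]
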